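-- pv_equiv track=rewrite | github.com/wojmichaluk/WDI-2022-2023 | extra/kolos_12-sam.py | w_ciagu
-- ===== SOURCE A (Python) =====
-- def w_ciagu(a,b):
--     if a>b:
--         return False
--     x,y=1,1
--     while x<=a and y<=b:
--         if a==x and b==y:
--             return True
--         x,y=y,x+y
--     return False
-- ===== SOURCE B (Python) =====
-- def w_ciagu(a, b):
--     if a < 1 or a > b:
--         return False
--     d = b * b - a * b - a * a
--     return abs(d) == 1
-- ===== Notes on version B (the rewrite author's own statement) =====
-- stated objective: simpler
-- what changed: Replaced the loop over consecutive Fibonacci pairs with the closed-form test |b^2 - ab - a^2| = 1 (with guards a >= 1 and a <= b), which characterizes consecutive Fibonacci pairs, so B needs no loop at all.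
import Mathlib
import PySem

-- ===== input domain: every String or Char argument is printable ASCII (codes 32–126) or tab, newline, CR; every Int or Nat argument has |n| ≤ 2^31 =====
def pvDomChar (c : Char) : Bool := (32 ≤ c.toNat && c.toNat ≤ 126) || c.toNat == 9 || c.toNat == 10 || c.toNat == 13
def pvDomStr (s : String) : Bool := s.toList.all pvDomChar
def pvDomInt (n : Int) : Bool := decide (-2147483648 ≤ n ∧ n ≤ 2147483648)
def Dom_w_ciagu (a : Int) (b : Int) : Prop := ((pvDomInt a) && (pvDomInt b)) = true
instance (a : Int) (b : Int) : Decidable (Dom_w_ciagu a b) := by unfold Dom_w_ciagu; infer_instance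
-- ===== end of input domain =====

-- B replaces A's Fibonacci-pair loop by the loop-free closed-form test |b^2-ab-a^2| = 1
-- (with guards a >= 1, a <= b); objective: simpler.

-- ===== PORT A =====
-- the while loop, as a fuel recursion (fuel only makes the loop total; it never runs out:
-- y strictly increases each iteration and the loop exits once y > b)
def wLoopA (fuel : Nat) (a b x y : Int) : Bool :=
  match fuel with
  | 0 => false
  | f + 1 =>
    if x ≤ a ∧ y ≤ b then
      if a = x ∧ b = y then true
      else wLoopA f a b y (x + y)
    else false

def w_ciagu (a : Int) (b : Int) : Bool :=
  if a > b then false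
  else wLoopA (b.toNat + 1) a b 1 1

-- ===== PORT B =====
def w_ciagu_alt (a : Int) (b : Int) : Bool :=
  if a < 1 ∨ a > b then false
  else |b * b - a * b - a * a| == 1

-- ===== PRECONDITION & SPEC =====
def Spec_w_ciagu (a : Int) (b : Int) (out : Bool) : Prop := out = w_ciagu_alt a b
instance (a : Int) (b : Int) (out : Bool) : Decidable (Spec_w_ciagu a b out) := by unfold Spec_w_ciagu; infer_instance

-- ===== CLAIM (what is proved, stated in full; the proofs are below) =====
def Claim_equal_w_ciagu : Prop := ∀ (a : Int) (b : Int), Dom_w_ciagu a b → Spec_w_ciagu a b (w_ciagu a b)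

-- ===== LEMMAS AND PROOFS =====

-- (a, b) is a pair of consecutive Fibonacci numbers (F_n, F_{n+1}) with n ≥ 1
def FibPair (a b : Int) : Prop := ∃ n : Nat, 1 ≤ n ∧ a = (Nat.fib n : Int) ∧ b = (Nat.fib (n + 1) : Int)

-- A's loop, started at the k-th Fibonacci pair with enough fuel, finds exactly the
-- Fibonacci pairs from index k on
lemma wLoopA_char (f : Nat) : ∀ (a b : Int) (k : Nat), 1 ≤ k →
    (b + 1 - (Nat.fib (k + 1) : Int)).toNat < f →
    (wLoopA f a b (Nat.fib k) (Nat.fib (k + 1)) = true ↔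
      ∃ n : Nat, k ≤ n ∧ a = (Nat.fib n : Int) ∧ b = (Nat.fib (n + 1) : Int)) := by
  induction f with
  | zero => intro a b k _ hf; omega
  | succ f ih =>
    intro a b k hk hf
    rw [wLoopA]
    by_cases hg : ((Nat.fib k : Int) ≤ a ∧ (Nat.fib (k + 1) : Int) ≤ b)
    · rw [if_pos hg]
      by_cases he : (a = (Nat.fib k : Int) ∧ b = (Nat.fib (k + 1) : Int))
      · rw [if_pos he]
        exact iff_of_true rfl ⟨k, le_refl k, he.1, he.2⟩
      · rw [if_neg he]
        have hfib : (Nat.fib k : Int) + (Nat.fib (k + 1) : Int) = (Nat.fib (k + 2) : Int) := by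
          push_cast [Nat.fib_add_two]; ring
        have hpos : 1 ≤ Nat.fib k := Nat.fib_pos.mpr hk
        have hfuel : (b + 1 - (Nat.fib (k + 2) : Int)).toNat < f := by
          have h1 : (Nat.fib (k + 1) : Int) ≤ b := hg.2
          have h2 : (Nat.fib (k + 1) : Int) + 1 ≤ (Nat.fib (k + 2) : Int) := by
            rw [← hfib]; have : (1 : Int) ≤ (Nat.fib k : Int) := by exact_mod_cast hpos
            omega
          omega
        rw [hfib, ih a b (k + 1) (by omega) hfuel]
        constructor
        · rintro ⟨n, hn, h1, h2⟩; exact ⟨n, by omega, h1, h2⟩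
        · rintro ⟨n, hn, h1, h2⟩
          refine ⟨n, ?_, h1, h2⟩
          rcases Nat.eq_or_lt_of_le hn with h | h
          · exact absurd ⟨by rw [h1, h], by rw [h2, h]⟩ he
          · omega
    · rw [if_neg hg]
      refine iff_of_false (by simp) ?_
      rintro ⟨n, hn, h1, h2⟩
      apply hg
      constructor
      · rw [h1]; exact_mod_cast Nat.fib_mono hn
      · rw [h2]; exact_mod_cast Nat.fib_mono (by omega : k + 1 ≤ n + 1)

-- A returns true exactly on consecutive Fibonacci pairs
lemma w_ciagu_iff (a b : Int) : w_ciagu a b = true ↔ FibPair a b := by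
  unfold w_ciagu FibPair
  by_cases hab : a > b
  · rw [if_pos hab]
    refine iff_of_false (by simp) ?_
    rintro ⟨n, hn, h1, h2⟩
    have : Nat.fib n ≤ Nat.fib (n + 1) := Nat.fib_mono (by omega)
    have : (Nat.fib n : Int) ≤ (Nat.fib (n + 1) : Int) := by exact_mod_cast this
    omega
  · rw [if_neg hab]
    have h1 : ((Nat.fib 1 : Nat) : Int) = 1 := by norm_num
    have h2 : ((Nat.fib 2 : Nat) : Int) = 1 := by norm_num
    have := wLoopA_char (b.toNat + 1) a b 1 (le_refl 1) (by rw [h2]; omega)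
    rw [h1, h2] at this
    exact this

-- the Fibonacci recurrence negates the quadratic form b^2 - ab - a^2
lemma quad_step (a b : Int) :
    (a + b) * (a + b) - b * (a + b) - b * b = -(b * b - a * b - a * a) := by ring

-- every consecutive Fibonacci pair satisfies |b^2 - ab - a^2| = 1
lemma fib_quad : ∀ n : Nat, 1 ≤ n →
    |(Nat.fib (n + 1) : Int) * (Nat.fib (n + 1) : Int)
      - (Nat.fib n : Int) * (Nat.fib (n + 1) : Int)
      - (Nat.fib n : Int) * (Nat.fib n : Int)| = 1 := by
  intro n hn
  induction n with
  | zero => omega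
  | succ m ih =>
    by_cases hm : 1 ≤ m
    · have hfib : ((Nat.fib (m + 2) : Nat) : Int) = (Nat.fib m : Int) + (Nat.fib (m + 1) : Int) := by
        push_cast [Nat.fib_add_two]; ring
      rw [hfib, quad_step, abs_neg]
      exact ih hm
    · have : m = 0 := by omega
      subst this
      norm_num
-- descent: any 1 ≤ a ≤ b with |b^2 - ab - a^2| = 1 is a consecutive Fibonacci pair
lemma quad_fib : ∀ (m : Nat) (a b : Int), b.toNat ≤ m → 1 ≤ a → a ≤ b →
    |b * b - a * b - a * a| = 1 → FibPair a b := by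
  intro m
  induction m with
  | zero => intro a b hm ha hab _; omega
  | succ m ih =>
    intro a b hm ha hab hq
    rcases eq_or_lt_of_le hab with heq | hlt
    · -- a = b forces a = b = 1
      subst heq
      have h1 : a * a = 1 := by
        have := abs_eq (le_of_lt (by omega : (0:Int) < 1)) |>.mp hq
        rcases this with h | h <;> nlinarith
      have ha1 : a = 1 := by nlinarith
      exact ⟨1, le_refl 1, by norm_num [ha1], by norm_num [ha1]⟩
    · -- a < b: the form forces b ≤ 2a, descend to (b - a, a)
      have hb2a : b ≤ 2 * a := by
        by_contra h
        push Not at h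
        have habs := abs_eq (le_of_lt (by omega : (0:Int) < 1)) |>.mp hq
        rcases habs with h' | h' <;> nlinarith
      have hq' : |a * a - (b - a) * a - (b - a) * (b - a)| = 1 := by
        have : a * a - (b - a) * a - (b - a) * (b - a) = -(b * b - a * b - a * a) := by ring
        rw [this, abs_neg]; exact hq
      have hdes : FibPair (b - a) a :=
        ih (b - a) a (by omega) (by omega) (by omega) hq'
      rcases hdes with ⟨n, hn, h1, h2⟩
      refine ⟨n + 1, by omega, h2, ?_⟩
      have : ((Nat.fib (n + 2) : Nat) : Int) = (Nat.fib n : Int) + (Nat.fib (n + 1) : Int) := by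
        push_cast [Nat.fib_add_two]; ring
      rw [this, ← h1, ← h2]; ring

-- B returns true exactly on consecutive Fibonacci pairs
lemma w_ciagu_alt_iff (a b : Int) : w_ciagu_alt a b = true ↔ FibPair a b := by
  unfold w_ciagu_alt
  by_cases hg : (a < 1 ∨ a > b)
  · rw [if_pos hg]
    refine iff_of_false (by simp) ?_
    rintro ⟨n, hn, h1, h2⟩
    have hp : 1 ≤ Nat.fib n := Nat.fib_pos.mpr hn
    have hmono : Nat.fib n ≤ Nat.fib (n + 1) := Nat.fib_mono (by omega)
    have hp' : (1 : Int) ≤ (Nat.fib n : Int) := by exact_mod_cast hp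
    have hmono' : (Nat.fib n : Int) ≤ (Nat.fib (n + 1) : Int) := by exact_mod_cast hmono
    omega
  · rw [if_neg hg]
    push Not at hg
    simp only [beq_iff_eq]
    constructor
    · intro h
      exact quad_fib b.toNat a b (le_refl _) hg.1 hg.2 h
    · rintro ⟨n, hn, h1, h2⟩
      rw [h1, h2]
      exact fib_quad n hn

-- ===== VERDICT (by name: the statement is the Claim_ definition above) =====
theorem w_ciagu_spec : Claim_equal_w_ciagu := by
  intro a b _
  unfold Spec_w_ciagu
  have hA := w_ciagu_iff a b
  have hB := w_ciagu_alt_iff a b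
  cases hA' : w_ciagu a b
  · cases hB' : w_ciagu_alt a b
    · rfl
    · exact absurd (hA.mpr (hB.mp hB')) (by simp [hA'])
  · rw [hB.mpr (hA.mp hA')]
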